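-- pv_equiv track=rewrite | github.com/SophonAlpha/particulate-matter-monitor | pmmonitor.py | build_mosi_frame
-- ===== SOURCE A (Python) =====
-- def build_mosi_frame(command, data=''):
--     """
--     Build the MOSI frame according to specification "Datasheet SPS30
--     Particulate Matter Sensor for Air Quality Monitoring and Control",
--     section "4.1 SHDLC Frame Layer"
--
--     :param command: the UART / SHDLC command. See also "Datasheet SPS30
--     Particulate Matter Sensor for Air Quality Monitoring and Control",
--     section "4.2 UART / SHDLC Commands"
--     :param data: the command data
--     :return: the MOSI frame as string of bytes in hex notation
--     """
--     frame = ['0x7e', '0x0', command, '0x{:x}'.format(len(data))]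
--     frame.extend(data)  # TX data
--     check = calculate_checksum([int(frame[1], 16), int(frame[2], 16),
--                                 int(frame[3], 16)] + [int(byte, 16)
--                                                       for byte in data])
--     check = '0x{:x}'.format(check)
--     frame.append(check)  # check
--     frame.append('0x7e')  # stop
--     frame = [byte for byte in frame]
--     frame = byte_stuffing(frame)
--     return frame
--
-- def calculate_checksum(data):
--     """
--     Calculate frame checksum.
--
--     :param data: list of frame content bytes in int format
--     :return: checksum as int
--     """
--
--     # Sum all bytes between start and stop (without start and stop bytes).
--     checksum = sum(data)
--     # Take the LSB of the result ...
--     checksum = checksum & 0xFF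
--     # ... and invert it. This will be the checksum.
--     checksum = ~checksum & 0xFF
--     return checksum
--
-- def byte_stuffing(frame):
--     """
--     Do byte-stuffing.
--
--     The 0x7e character is sent at the beginning and at the end of the frame to
--     signalize frame start and stop. If this byte (0x7E) occurs anywhere else in
--     the frame, it must be replaced by two other bytes (byte-stuffing).
--     This also applies to the characters 0x7D, 0x11 and 0x13.
--
--     :param frame: the frame a list of hex values in string format
--     :return: new 'byte stuffed' frame
--     """
--     stuffing = {
--         '0x7e': ['0x7d', '0x5e'],
--         '0x7d': ['0x7d', '0x5d'],
--         '0x11': ['0x7d', '0x31'],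
--         '0x13': ['0x7d', '0x33'],
--     }
--     new_frame = [frame[0]]
--     for index, byte in enumerate(frame[1:-1]):
--         if byte in stuffing.keys():
--             new_frame.extend(stuffing[byte])
--         else:
--             new_frame.append(byte)
--     new_frame.append(frame[-1])  # add end frame
--     return new_frame
-- ===== SOURCE B (Python) =====
-- def build_mosi_frame(command, data=''):
--     """Build the SHDLC MOSI frame in one fused pass: the frame bytes are
--     emitted already byte-stuffed while the checksum sum is accumulated
--     alongside, instead of building the raw frame and re-parsing it."""
--     SUB = {
--         '0x7e': ['0x7d', '0x5e'],
--         '0x7d': ['0x7d', '0x5d'],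
--         '0x11': ['0x7d', '0x31'],
--         '0x13': ['0x7d', '0x33'],
--     }
--     out = ['0x7e']                       # start byte, never stuffed
--     total = 0
--     for byte in ['0x0', command, '0x{:x}'.format(len(data))]:
--         total += int(byte, 16)
--         out += SUB.get(byte, [byte])
--     for byte in data:
--         total += int(byte, 16)
--         out += SUB.get(byte, [byte])
--     check = '0x{:x}'.format(0xFF - (total & 0xFF))
--     out += SUB.get(check, [check])
--     out.append('0x7e')                   # stop byte, never stuffed
--     return out
-- ===== Notes on version B (the rewrite author's own statement) =====
-- stated objective: simpler
-- what changed: B replaces A's three phases (build the raw frame list, re-index and re-parse it with int(,16) to compute the checksum, then byte-stuff it in a separate enumerate loop) with one fused pass that emits already-stuffed bytes while accumulating the checksum sum, finalized as 0xFF-(total&0xFF).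
import Mathlib
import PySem

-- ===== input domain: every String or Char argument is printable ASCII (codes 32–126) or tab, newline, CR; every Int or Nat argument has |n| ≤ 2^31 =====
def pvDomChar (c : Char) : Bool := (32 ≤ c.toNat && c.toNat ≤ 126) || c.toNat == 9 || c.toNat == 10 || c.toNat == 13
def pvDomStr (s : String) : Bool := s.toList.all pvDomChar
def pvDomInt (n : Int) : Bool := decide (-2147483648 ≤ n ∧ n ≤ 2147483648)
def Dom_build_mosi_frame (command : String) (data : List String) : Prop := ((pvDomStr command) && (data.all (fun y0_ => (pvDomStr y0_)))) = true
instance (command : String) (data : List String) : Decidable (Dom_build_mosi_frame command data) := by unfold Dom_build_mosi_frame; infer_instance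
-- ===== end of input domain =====

-- B fuses A's three phases (build the raw frame, re-parse it for the checksum, byte-stuff it
-- in a separate pass) into one pass that emits already-stuffed bytes while accumulating the
-- checksum sum; objective: simpler, no speed claim.

-- ===== shared helpers (literals both Pythons contain) =====
-- '0x{:x}'.format(n) for n ≥ 0 (the only case either Python reaches: len(data) ≥ 0 and the
-- checksum is masked with & 0xFF): "0x" followed by lowercase hex digits; exact on Nat.
def pvHexDigit (n : Nat) : Char := Char.ofNat (if n < 10 then 48 + n else 87 + n)
def pvToHexChars (n : Nat) : List Char :=
  if n < 16 then [pvHexDigit n]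
  else pvToHexChars (n / 16) ++ [pvHexDigit (n % 16)]
  decreasing_by exact Nat.div_lt_self (by omega) (by omega)
def pvHexFmt (n : Nat) : String := String.ofList ('0' :: 'x' :: pvToHexChars n)
-- int(s, 16); Pre_ guarantees the parse succeeds wherever either Python calls it
def pvParse (s : String) : Int := (PySem.Int.ofStrBase? s 16).getD 0
-- the byte-stuffing dict literal (identical in A's byte_stuffing and B's SUB), as first-match lookup
def pvStuffTable? (b : String) : Option (List String) :=
  if b = "0x7e" then some ["0x7d", "0x5e"]
  else if b = "0x7d" then some ["0x7d", "0x5d"]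
  else if b = "0x11" then some ["0x7d", "0x31"]
  else if b = "0x13" then some ["0x7d", "0x33"]
  else none

-- ===== PORT A =====
def pv_calculate_checksum (data : List Int) : Int :=
  let checksum := data.sum
  let checksum := PySem.Int.band checksum 255
  PySem.Int.band (Int.not checksum) 255   -- ~checksum & 0xFF

def pv_byte_stuffing (frame : List String) : List String :=
  let new_frame : List String := [(PySem.List.pyGet? frame 0).getD ""]   -- frame[0]; frame is never empty here
  let new_frame := (PySem.List.enumerate (PySem.List.slice frame (some 1) (some (-1)))).foldl
      (fun acc ib =>
        match pvStuffTable? ib.2 with       -- 'if byte in stuffing.keys(): extend stuffing[byte] else append byte'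
        | some v => acc ++ v
        | none   => acc ++ [ib.2]) new_frame
  new_frame ++ [(PySem.List.pyGet? frame (-1)).getD ""]   -- frame[-1]

def build_mosi_frame (command : String) (data : List String) : List String :=
  let frame := ["0x7e", "0x0", command, pvHexFmt data.length] ++ data
  let check := pv_calculate_checksum
      ([pvParse ((PySem.List.pyGet? frame 1).getD ""),
        pvParse ((PySem.List.pyGet? frame 2).getD ""),
        pvParse ((PySem.List.pyGet? frame 3).getD "")] ++ data.map pvParse)
  -- '0x{:x}'.format(check): check = … & 0xFF is ≥ 0, so .toNat is exact
  let frame := frame ++ [pvHexFmt check.toNat, "0x7e"]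
  pv_byte_stuffing (frame.map (fun byte => byte))   -- [byte for byte in frame]

-- ===== PORT B =====
def pvSub (b : String) : List String := (pvStuffTable? b).getD [b]   -- SUB.get(byte, [byte])

def build_mosi_frame_alt (command : String) (data : List String) : List String :=
  let s1 := (["0x0", command, pvHexFmt data.length] : List String).foldl
      (fun st byte => (st.1 ++ pvSub byte, st.2 + pvParse byte)) ((["0x7e"] : List String), (0 : Int))
  let s2 := data.foldl (fun st byte => (st.1 ++ pvSub byte, st.2 + pvParse byte)) s1
  let check := pvHexFmt (255 - PySem.Int.band s2.2 255).toNat   -- '0x{:x}'.format(0xFF - (total & 0xFF))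
  (s2.1 ++ pvSub check) ++ ["0x7e"]

-- ===== PRECONDITION & SPEC =====
-- Pre_ excludes exactly the inputs where Python A raises ValueError: a command or data
-- element that int(·, 16) cannot parse.
def Pre_build_mosi_frame (command : String) (data : List String) : Prop :=
  (PySem.Int.ofStrBase? command 16).isSome = true ∧
  (data.all fun b => (PySem.Int.ofStrBase? b 16).isSome) = true
instance (command : String) (data : List String) : Decidable (Pre_build_mosi_frame command data) := by unfold Pre_build_mosi_frame; infer_instance
def pvWitness_build_mosi_frame : String × List String := ("0x0", ["0x7e", "1f"])

def Spec_build_mosi_frame (command : String) (data : List String) (out : List String) : Prop := out = build_mosi_frame_alt command data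
instance (command : String) (data : List String) (out : List String) : Decidable (Spec_build_mosi_frame command data out) := by unfold Spec_build_mosi_frame; infer_instance

-- ===== CLAIM (what is proved, stated in full; the proofs are below) =====
def Claim_equal_build_mosi_frame : Prop := ∀ (command : String) (data : List String), Dom_build_mosi_frame command data → Pre_build_mosi_frame command data → Spec_build_mosi_frame command data (build_mosi_frame command data)

-- ===== LEMMAS AND PROOFS =====

-- B's fused fold, split into its list and checksum components
theorem pv_foldl_pair (xs : List String) (st : List String × Int) :
    xs.foldl (fun st byte => (st.1 ++ pvSub byte, st.2 + pvParse byte)) st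
      = (st.1 ++ xs.flatMap pvSub, st.2 + (xs.map pvParse).sum) := by
  induction xs generalizing st with
  | nil => simp
  | cons x t ih => simp [ih]; ring

-- A's stuffing loop (over enumerate, index unused) appends exactly pvSub of each byte
theorem pv_foldl_enumerate (xs : List String) (acc : List String) (n : Int) :
    (PySem.List.enumerate xs n).foldl
      (fun acc ib =>
        match pvStuffTable? ib.2 with
        | some v => acc ++ v
        | none   => acc ++ [ib.2]) acc = acc ++ xs.flatMap pvSub := by
  induction xs generalizing acc n with
  | nil => simp [PySem.List.enumerate]
  | cons x t ih =>
      simp only [PySem.List.enumerate, List.foldl_cons, List.flatMap_cons]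
      rw [ih]
      cases h : pvStuffTable? x <;> simp [pvSub, h]

-- frame[1:-1] drops exactly the start and stop bytes
theorem pv_slice_mid (x y : String) (M : List String) :
    PySem.List.slice (x :: (M ++ [y])) (some 1) (some (-1))  = M := by
  simp [PySem.List.slice, PySem.List.clampIdx]
  rw [if_neg (by omega)]
  simp

-- ~(s & 0xFF) & 0xFF = 0xFF - (s & 0xFF): A's checksum equals B's
theorem pv_not_band (s : Int) :
    PySem.Int.band (PySem.Int.band s 255).not 255 = 255 - PySem.Int.band s 255 := by
  obtain ⟨k, hk, hk255⟩ : ∃ k : Nat, PySem.Int.band s 255 = (k : Int) ∧ k ≤ 255 := by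
    unfold PySem.Int.band
    split_ifs with h1 h2
    · exact ⟨s.toNat &&& 255, by simp, Nat.and_le_right⟩
    · omega
    · exact ⟨255 - (255 &&& (-s - 1).toNat), by simp, Nat.sub_le _ _⟩
    · omega
  rw [hk]
  have hnot : Int.not (k : Int) = -(k : Int) - 1 := by
    cases k
    · simp [Int.not]
    · simp [Int.not]; omega
  rw [hnot]
  unfold PySem.Int.band
  rw [if_neg (by omega), if_pos (by norm_num)]
  have h2 : (-(-(k : Int) - 1) - 1).toNat = k := by omega
  rw [h2]
  have h3 : (255 : Int).toNat &&& k = k := by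
    have h4 : (255 : Int).toNat = 255 := by rfl
    rw [h4, Nat.and_comm]
    have := Nat.and_two_pow_sub_one_eq_mod k 8
    norm_num at this
    omega
  rw [h3]
  have h4 : (255 : Int).toNat = 255 := by rfl
  rw [h4]
  push_cast [hk255]
  omega

-- frame[-1] is the stop byte
theorem pv_pyGet_last (x y : String) (M : List String) :
    PySem.List.pyGet? (x :: (M ++ [y])) (-1) = some y := by
  rw [show x :: (M ++ [y]) = (x :: M) ++ [y] by simp,
      PySem.List.pyGet?_neg_one_append_singleton]

-- the two ports agree on every input (the Lean ports are total: pvParse defaults where Python raises)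
theorem pv_main_eq (command : String) (data : List String) :
    build_mosi_frame command data = build_mosi_frame_alt command data := by
  unfold build_mosi_frame build_mosi_frame_alt pv_byte_stuffing pv_calculate_checksum
  have g1 : PySem.List.pyGet? (["0x7e", "0x0", command, pvHexFmt data.length] ++ data) 1 = some "0x0" := by
    simp [PySem.List.pyGet?, PySem.List.pyIdx?]; rw [if_pos (by omega)]; rfl
  have g2 : PySem.List.pyGet? (["0x7e", "0x0", command, pvHexFmt data.length] ++ data) 2 = some command := by
    simp [PySem.List.pyGet?, PySem.List.pyIdx?]; rw [if_pos (by omega)]; rfl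
  have g3 : PySem.List.pyGet? (["0x7e", "0x0", command, pvHexFmt data.length] ++ data) 3 = some (pvHexFmt data.length) := by
    simp [PySem.List.pyGet?, PySem.List.pyIdx?]; rw [if_pos (by omega)]; rfl
  simp only [g1, g2, g3, Option.getD_some, List.foldl_cons, List.foldl_nil, pv_foldl_pair]
  have hS : ([pvParse "0x0", pvParse command, pvParse (pvHexFmt data.length)] ++ List.map pvParse data).sum
      = 0 + pvParse "0x0" + pvParse command + pvParse (pvHexFmt data.length) + (List.map pvParse data).sum := by
    simp; ring
  simp only [hS, pv_not_band]
  set chk := pvHexFmt (255 - PySem.Int.band (0 + pvParse "0x0" + pvParse command + pvParse (pvHexFmt data.length) + (List.map pvParse data).sum) 255).toNat with hchk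
  have hmap : List.map (fun byte : String => byte)
      (["0x7e", "0x0", command, pvHexFmt data.length] ++ data ++ [chk, "0x7e"])
      = "0x7e" :: (("0x0" :: command :: pvHexFmt data.length :: (data ++ [chk])) ++ ["0x7e"]) := by
    simp
  rw [hmap, pv_slice_mid, pv_foldl_enumerate, PySem.List.pyGet?_zero_cons, pv_pyGet_last]
  simp

-- ===== VERDICT (by name: the statement is the Claim_ definition above) =====
theorem build_mosi_frame_spec : Claim_equal_build_mosi_frame := by
  intro command data _ _
  unfold Spec_build_mosi_frame
  exact pv_main_eq command data
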